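-- pv_equiv track=rewrite | github.com/KirilTan/Python-Advanced-01-2024 | 04_multidimensional_lists/exercise/07_snake_moves.py | word_snake
-- ===== SOURCE A (Python) =====
-- from collections import deque
--
-- def word_snake(word: list, rows: int, columns: int) -> list:
--     """
--     This function takes a list of characters (representing a word), a number of rows, and a number of columns
--     and returns a list of rows, where each row is a string of the given number of columns, with the characters
--     from the word wrapped around in a snake pattern.
--
--     Parameters:
--         word (list): A list of characters representing the word to be wrapped.
--         rows (int): The number of rows in the output list.
--         columns (int): The number of columns in each row of the output list.
--
--     Returns:
--         list: A list of rows, where each row is a string of the given number of columns,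
--         with the characters from the word wrapped around in a snake pattern.
--
--     """
--
--     new_word = []
--
--     word_copy = deque(word)
--     for row in range(rows):
--
--         # Extend the word_copy so that it can fit in the current_tow
--         while len(word_copy) < columns:
--             word_copy.extend(word)
--
--         # If the current row is even, add the characters from the word_copy to the new_word
--         if row % 2 == 0:
--             new_word.append(''.join([str(word_copy.popleft()) for _ in range(columns)]),)
--         # If the current row is odd, add the characters from the word_copy to the new_word starting from the end
--         else:
--             new_word.append(''.join([str(word_copy.popleft()) for _ in range(columns)][::-1]))
--
--     return new_word
-- ===== SOURCE B (Python) =====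
-- def word_snake(word: list, rows: int, columns: int) -> list:
--     # Re-implementation: modular indexing into the cyclic word with a running
--     # position counter instead of a deque with pop/refill.
--     out = []
--     idx = 0
--     n = len(word)
--     for row in range(rows):
--         chars = [str(word[(idx + j) % n]) for j in range(columns)]
--         if row % 2 == 1:
--             chars.reverse()
--         out.append(''.join(chars))
--         idx += columns
--     return out
-- ===== Notes on version B (the rewrite author's own statement) =====
-- stated objective: simpler
-- what changed: Replaced the deque with popleft/refill-while-loop by direct modular indexing into the word with a running position counter.
import Mathlib
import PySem

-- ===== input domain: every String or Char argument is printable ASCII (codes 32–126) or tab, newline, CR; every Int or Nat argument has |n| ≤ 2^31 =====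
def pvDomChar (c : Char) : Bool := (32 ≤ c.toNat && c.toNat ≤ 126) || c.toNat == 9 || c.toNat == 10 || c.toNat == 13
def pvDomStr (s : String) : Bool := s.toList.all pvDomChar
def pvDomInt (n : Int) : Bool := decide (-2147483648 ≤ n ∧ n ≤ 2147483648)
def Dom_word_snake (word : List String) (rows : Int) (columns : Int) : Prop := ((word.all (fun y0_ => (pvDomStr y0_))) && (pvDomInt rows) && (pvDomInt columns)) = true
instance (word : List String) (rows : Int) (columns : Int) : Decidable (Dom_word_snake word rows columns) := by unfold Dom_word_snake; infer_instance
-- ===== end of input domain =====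

-- B replaces A's deque with pop/refill by modular indexing with a running position counter (objective: simpler).
-- Pre_ excludes only inputs where neither program returns: on word = [] with rows ≥ 1 and columns ≥ 1,
-- A's refill while-loop never terminates and B raises ZeroDivisionError.


-- ===== PORT A =====
-- 'while len(word_copy) < columns: word_copy.extend(word)'; the 'word = []' branch only makes the
-- (in Python non-terminating) loop total; such inputs are outside Pre_word_snake.
def refillA (word : List String) (columns : Int) (dq : List String) : List String :=
  if (dq.length : Int) < columns then
    if word = [] then dq
    else refillA word columns (dq ++ word)
  else dq
termination_by columns.toNat - dq.length
decreasing_by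
  simp only [List.length_append]
  have hw : 1 ≤ word.length := by rcases word with _ | _ <;> simp_all
  omega

-- the body of A's 'for row in range(rows)' loop; state = (new_word, word_copy)
def snakeStepA (word : List String) (columns : Int)
    (st : List String × List String) (row : Int) : List String × List String :=
  let dq := refillA word columns st.2
  let taken := dq.take columns.toNat          -- the `columns` popleft()s of the comprehension
  let rest := dq.drop columns.toNat
  if PySem.Int.mod row 2 = 0 then
    (st.1 ++ [PySem.Str.join "" taken], rest)
  else
    (st.1 ++ [PySem.Str.join "" taken.reverse], rest)

def word_snake (word : List String) (rows : Int) (columns : Int) : List String :=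
  ((PySem.List.pyRange 0 rows 1).foldl (snakeStepA word columns) ([], word)).1

-- ===== PORT B =====
-- the body of B's loop; state = (out, idx)
def snakeStepB (word : List String) (columns : Int)
    (st : List String × Int) (row : Int) : List String × Int :=
  let chars := (PySem.List.pyRange 0 columns 1).map
    (fun j => (PySem.List.pyGet? word (PySem.Int.mod (st.2 + j) (word.length : Int))).getD "")
  let chars := if PySem.Int.mod row 2 = 1 then chars.reverse else chars
  (st.1 ++ [PySem.Str.join "" chars], st.2 + columns)

def word_snake_alt (word : List String) (rows : Int) (columns : Int) : List String :=
  ((PySem.List.pyRange 0 rows 1).foldl (snakeStepB word columns) ([], 0)).1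

-- ===== PRECONDITION & SPEC =====
-- Pre_ excludes exactly the inputs on which A never returns (infinite refill loop on an empty word
-- with rows ≥ 1 and columns ≥ 1); B raises ZeroDivisionError there, so no returning input is excluded.
def Pre_word_snake (word : List String) (rows : Int) (columns : Int) : Prop :=
  ¬ (word = [] ∧ 1 ≤ rows ∧ 1 ≤ columns)
instance (word : List String) (rows : Int) (columns : Int) : Decidable (Pre_word_snake word rows columns) := by unfold Pre_word_snake; infer_instance

def pvWitness_word_snake : List String × Int × Int := (["s", "n", "a", "k", "e"], 3, 4)

def Spec_word_snake (word : List String) (rows : Int) (columns : Int) (out : List String) : Prop := out = word_snake_alt word rows columns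
instance (word : List String) (rows : Int) (columns : Int) (out : List String) : Decidable (Spec_word_snake word rows columns out) := by unfold Spec_word_snake; infer_instance

-- ===== CLAIM (what is proved, stated in full; the proofs are below) =====
def Claim_equal_word_snake : Prop := ∀ (word : List String) (rows : Int) (columns : Int), Dom_word_snake word rows columns → Pre_word_snake word rows columns → Spec_word_snake word rows columns (word_snake word rows columns)

-- ===== LEMMAS AND PROOFS =====

-- the "cyclic stream" shape the deque keeps: word.drop p ++ t spare copies of word
-- element j of such a list is word[(p+j) % n]
lemma cyc_get (word : List String) (t : Nat) :
    ∀ (p j : Nat), p ≤ word.length →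
    j < (word.drop p ++ (List.replicate t word).flatten).length →
    (word.drop p ++ (List.replicate t word).flatten)[j]? = word[(p + j) % word.length]? := by
  induction t with
  | zero =>
    intro p j hp hj
    simp only [List.replicate, List.flatten_nil, List.append_nil, List.length_drop] at hj
    have hlt : p + j < word.length := by omega
    rw [Nat.mod_eq_of_lt hlt]
    simp only [List.replicate, List.flatten_nil, List.append_nil]
    rw [List.getElem?_drop]
  | succ t ih =>
    intro p j hp hj
    by_cases h : j < word.length - p
    · have hlt : p + j < word.length := by omega
      rw [List.getElem?_append_left (by simpa using h), List.getElem?_drop,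
        Nat.mod_eq_of_lt hlt]
    · rw [List.getElem?_append_right (by simp only [List.length_drop]; omega)]
      have hrep : (List.replicate (t+1) word).flatten = word.drop 0 ++ (List.replicate t word).flatten := by
        simp [List.replicate_succ]
      rw [List.length_drop, hrep]
      have hlen : j - (word.length - p) < (word.drop 0 ++ (List.replicate t word).flatten).length := by
        simp only [List.length_append, List.length_drop, List.length_flatten,
          List.map_replicate, List.sum_replicate, smul_eq_mul, Nat.succ_mul] at hj ⊢
        omega
      rw [ih 0 (j - (word.length - p)) (by omega) hlen]
      have heq : p + j = (0 + (j - (word.length - p))) + word.length := by omega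
      rw [heq, Nat.add_mod_right]

-- dropping c elements keeps the shape, advancing the position by c (mod n)
lemma cyc_drop (word : List String) (t : Nat) :
    ∀ (p c : Nat), p ≤ word.length →
    c ≤ (word.drop p ++ (List.replicate t word).flatten).length →
    ∃ p' t', p' ≤ word.length ∧ p' % word.length = (p + c) % word.length ∧
      (word.drop p ++ (List.replicate t word).flatten).drop c
        = word.drop p' ++ (List.replicate t' word).flatten := by
  induction t with
  | zero =>
    intro p c hp hc
    simp only [List.replicate, List.flatten_nil, List.append_nil, List.length_drop] at hc ⊢
    exact ⟨p + c, 0, by omega, rfl, by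
      simp only [List.replicate, List.flatten_nil, List.append_nil, List.drop_drop]⟩
  | succ t ih =>
    intro p c hp hc
    by_cases h : c ≤ word.length - p
    · refine ⟨p + c, t + 1, by omega, rfl, ?_⟩
      rw [List.drop_append_of_le_length (by simpa using h), List.drop_drop]
    · have hrep : (List.replicate (t+1) word).flatten = word.drop 0 ++ (List.replicate t word).flatten := by
        simp [List.replicate_succ]
      have hsplit : c = (word.drop p).length + (c - (word.length - p)) := by
        simp only [List.length_drop]; omega
      have hc' : c - (word.length - p) ≤ (word.drop 0 ++ (List.replicate t word).flatten).length := by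
        simp only [List.length_append, List.length_drop, List.length_flatten,
          List.map_replicate, List.sum_replicate, smul_eq_mul, Nat.succ_mul] at hc ⊢
        omega
      obtain ⟨p', t', h1, h2, h3⟩ := ih 0 (c - (word.length - p)) (by omega) hc'
      refine ⟨p', t', h1, ?_, ?_⟩
      · rw [h2]
        have heq : p + c = (0 + (c - (word.length - p))) + word.length := by omega
        rw [heq, Nat.add_mod_right]
      · rw [hsplit, List.drop_append]
        have hnil : List.drop ((word.drop p).length + (c - (word.length - p))) (word.drop p) = [] :=
          List.drop_eq_nil_of_le (by omega)
        rw [hnil, List.nil_append, Nat.add_sub_cancel_left, hrep, h3]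

-- refillA only appends whole copies of word, and afterwards length ≥ columns
lemma refillA_spec (word : List String) (columns : Int) (hw : word ≠ []) (dq : List String) :
    ∃ k, refillA word columns dq = dq ++ (List.replicate k word).flatten ∧
      columns ≤ ((refillA word columns dq).length : Int) := by
  fun_induction refillA word columns dq with
  | case1 d h hw' => exact absurd hw' hw
  | case2 d h hw' ih =>
    obtain ⟨k, hk1, hk2⟩ := ih
    refine ⟨k + 1, ?_, hk2⟩
    rw [hk1, List.append_assoc]
    simp [List.replicate_succ]
  | case3 d h =>
    refine ⟨0, by simp, by omega⟩

-- both loop bodies append the same row string when the deque is the cyclic stream at position idx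
lemma fold_eq (word : List String) (columns : Int) (hw : word ≠ []) (hc : 1 ≤ columns) :
    ∀ (l : List Int) (acc : List String) (p t : Nat) (idx : Int),
    p ≤ word.length → (p : Int) % (word.length : Int) = idx % (word.length : Int) →
    (l.foldl (snakeStepA word columns) (acc, word.drop p ++ (List.replicate t word).flatten)).1
      = (l.foldl (snakeStepB word columns) (acc, idx)).1 := by
  intro l
  induction l with
  | nil => intro acc p t idx hp hpidx; rfl
  | cons r l ih =>
    intro acc p t idx hp hpidx
    have hn : 0 < word.length := List.length_pos_iff.2 hw
    obtain ⟨k, hk1, hk2⟩ :=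
      refillA_spec word columns hw (word.drop p ++ (List.replicate t word).flatten)
    have hfull : word.drop p ++ (List.replicate t word).flatten ++ (List.replicate k word).flatten
        = word.drop p ++ (List.replicate (t + k) word).flatten := by
      rw [List.append_assoc, List.replicate_add, List.flatten_append]
    rw [hfull] at hk1
    have hk2' : columns ≤ ((word.drop p ++ (List.replicate (t + k) word).flatten).length : Int) := by
      rw [hk1] at hk2; exact hk2
    have hlen : columns.toNat ≤ (word.drop p ++ (List.replicate (t + k) word).flatten).length := by
      omega
    -- the row string is the same on both sides
    have htc : (word.drop p ++ (List.replicate (t + k) word).flatten).take columns.toNat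
        = (PySem.List.pyRange 0 columns 1).map
            (fun j => (PySem.List.pyGet? word (PySem.Int.mod (idx + j) (word.length : Int))).getD "") := by
      have hcol : columns = ((columns.toNat : Nat) : Int) := by omega
      apply List.ext_getElem?
      intro i
      have hlenB : ((PySem.List.pyRange 0 columns 1).map
          (fun j => (PySem.List.pyGet? word (PySem.Int.mod (idx + j) (word.length : Int))).getD "")).length
          = columns.toNat := by
        rw [List.length_map, PySem.List.length_pyRange_one]
        omega
      by_cases hi : i < columns.toNat
      · rw [List.getElem?_take_of_lt hi]
        rw [cyc_get word (t + k) p i hp (by omega)]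
        have hrhs : ((PySem.List.pyRange 0 columns 1).map
            (fun j => (PySem.List.pyGet? word (PySem.Int.mod (idx + j) (word.length : Int))).getD ""))[i]?
            = some ((PySem.List.pyGet? word (PySem.Int.mod (idx + (i : Int)) (word.length : Int))).getD "") := by
          rw [hcol]
          rw [PySem.List.getElem?_map_pyRange_zero _ _ _ hi]
        rw [hrhs]
        have hmlt : (p + i) % word.length < word.length := Nat.mod_lt _ hn
        have hm : PySem.Int.mod (idx + (i : Int)) (word.length : Int)
            = (((p + i) % word.length : Nat) : Int) := by
          rw [PySem.Int.mod_eq_emod_of_pos (by omega)]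
          have h1 : (((p + i) % word.length : Nat) : Int)
              = ((p : Int) + (i : Int)) % (word.length : Int) := by push_cast; rfl
          rw [h1]
          exact Int.ModEq.add_right (i : Int) hpidx.symm
        rw [hm, PySem.List.pyGet?_natCast]
        rw [List.getElem?_eq_getElem hmlt]
        simp
      · rw [List.getElem?_eq_none (by simp only [List.length_take]; omega),
          List.getElem?_eq_none (by omega)]
    -- parity of the row index
    have hm2 : PySem.Int.mod r 2 = 0 ∨ PySem.Int.mod r 2 = 1 := by
      have h1 := PySem.Int.mod_nonneg (a := r) (b := 2) (by omega)
      have h2 := PySem.Int.mod_lt (a := r) (b := 2) (by omega)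
      omega
    -- the new deque is the cyclic stream at position idx + columns
    obtain ⟨p', t', hp', hpmod, hdrop⟩ :=
      cyc_drop word (t + k) p columns.toNat hp hlen
    have hpidx' : ((p' : Nat) : Int) % (word.length : Int)
        = (idx + columns) % (word.length : Int) := by
      have hcast : ((p' % word.length : Nat) : Int)
          = (((p + columns.toNat) % word.length : Nat) : Int) :=
        congrArg (Nat.cast : Nat → Int) hpmod
      push_cast at hcast
      have hcn : ((columns.toNat : Nat) : Int) = columns := by omega
      rw [hcn] at hcast
      rw [hcast]
      exact Int.ModEq.add_right columns hpidx
    have hA : snakeStepA word columns (acc, word.drop p ++ (List.replicate t word).flatten) r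
        = (if PySem.Int.mod r 2 = 0 then
            (acc ++ [PySem.Str.join ""
              ((word.drop p ++ (List.replicate (t + k) word).flatten).take columns.toNat)],
             word.drop p' ++ (List.replicate t' word).flatten)
          else
            (acc ++ [PySem.Str.join ""
              ((word.drop p ++ (List.replicate (t + k) word).flatten).take columns.toNat).reverse],
             word.drop p' ++ (List.replicate t' word).flatten)) := by
      unfold snakeStepA
      dsimp only
      rw [hk1, hdrop]
    rw [List.foldl_cons, List.foldl_cons, hA]
    unfold snakeStepB
    dsimp only
    rcases hm2 with h0 | h1
    · rw [if_pos h0, if_neg (by omega), htc]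
      exact ih _ p' t' (idx + columns) hp' hpidx'
    · rw [if_neg (by omega), if_pos h1, htc]
      exact ih _ p' t' (idx + columns) hp' hpidx'

-- degenerate columns: every row is "", both sides
lemma fold_eq_nonpos (word : List String) (columns : Int) (hc : columns ≤ 0) :
    ∀ (l : List Int) (acc : List String) (dq : List String) (idx : Int),
    (l.foldl (snakeStepA word columns) (acc, dq)).1
      = (l.foldl (snakeStepB word columns) (acc, idx)).1 := by
  intro l
  induction l with
  | nil => intro acc dq idx; rfl
  | cons r l ih =>
    intro acc dq idx
    have hA : snakeStepA word columns (acc, dq) r = (acc ++ [PySem.Str.join "" []], dq) := by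
      unfold snakeStepA
      dsimp only
      have hcond : ¬ ((dq.length : Int) < columns) := by omega
      rw [refillA, if_neg hcond, Int.toNat_of_nonpos hc]
      split_ifs <;> simp
    have hB : snakeStepB word columns (acc, idx) r
        = (acc ++ [PySem.Str.join "" []], idx + columns) := by
      unfold snakeStepB
      rw [PySem.List.pyRange_one_eq_nil (by omega)]
      split_ifs <;> rfl
    rw [List.foldl_cons, List.foldl_cons, hA, hB]
    exact ih _ _ _

-- ===== VERDICT (by name: the statement is the Claim_ definition above) =====
theorem word_snake_spec : Claim_equal_word_snake := by
  intro word rows columns _ hpre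
  unfold Spec_word_snake word_snake word_snake_alt
  by_cases hr : rows ≤ 0
  · rw [PySem.List.pyRange_one_eq_nil (by omega)]; rfl
  · by_cases hc : columns ≤ 0
    · exact fold_eq_nonpos word columns hc _ _ _ _
    · have hw : word ≠ [] := by
        intro h; exact hpre ⟨h, by omega, by omega⟩
      have := fold_eq word columns hw (by omega) (PySem.List.pyRange 0 rows 1) [] 0 0 0
        (by omega) (by simp)
      simpa using this
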